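-- pv_equiv track=rewrite | github.com/Chunfu-Shawn/STellaris-Analysis-Pipeline | Spatial_mapping/Tangram/assign_coordinates.py | make_elements_unique
-- ===== SOURCE A (Python) =====
-- def make_elements_unique(lst):
--     count_dict = {}
--     unique_lst = []
--     for elem in lst:
--         if elem not in count_dict:
--             count_dict[elem] = 0
--             unique_lst.append(elem)
--         else:
--             count_dict[elem] += 1
--             unique_lst.append(f"{elem}.{count_dict[elem]}")
--     return unique_lst
-- ===== SOURCE B (Python) =====
-- def make_elements_unique(lst):
--     # Positional formulation: element i keeps its name if it is the first
--     # occurrence, else gets a suffix equal to how many times it appeared before.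
--     return [e if (c := lst[:i].count(e)) == 0 else f"{e}.{c}"
--             for i, e in enumerate(lst)]
-- ===== Notes on version B (the rewrite author's own statement) =====
-- stated objective: simpler
-- what changed: Replaces the stateful counter-dict loop with a stateless one-line comprehension that names each position by the count of its element in the preceding prefix.
import Mathlib
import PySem

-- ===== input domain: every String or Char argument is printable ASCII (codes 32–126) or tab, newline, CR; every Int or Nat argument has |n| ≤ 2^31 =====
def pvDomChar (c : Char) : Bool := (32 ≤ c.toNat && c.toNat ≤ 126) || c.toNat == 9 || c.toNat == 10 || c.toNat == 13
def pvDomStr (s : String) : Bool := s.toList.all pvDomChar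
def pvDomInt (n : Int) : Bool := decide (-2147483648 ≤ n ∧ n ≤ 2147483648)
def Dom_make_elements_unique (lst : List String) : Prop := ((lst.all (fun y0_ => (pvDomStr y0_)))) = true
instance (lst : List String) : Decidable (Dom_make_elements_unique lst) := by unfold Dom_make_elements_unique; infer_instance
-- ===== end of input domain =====

-- B replaces A's stateful counter-dict loop by a stateless comprehension keyed on
-- prefix counts (objective: simpler; not faster).

-- f"{elem}.{c}" (shared formatting helper for both ports)
def pvSuffix (e : String) (c : Int) : String := e ++ "." ++ PySem.Int.toStr c

-- ===== PORT A =====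
def pvStepA (st : PySem.Dict String Int × List String) (elem : String) :
    PySem.Dict String Int × List String :=
  if ¬ st.1.contains elem then
    (st.1.insert elem 0, st.2 ++ [elem])
  else
    let c := st.1.getD elem 0 + 1
    (st.1.insert elem c, st.2 ++ [pvSuffix elem c])

def make_elements_unique (lst : List String) : List String :=
  (lst.foldl pvStepA (PySem.Dict.empty, [])).2

-- ===== PORT B =====
-- lst[:i] with i ≥ 0 (enumerate index) — PySem.List.slice is exact here
def make_elements_unique_alt (lst : List String) : List String :=
  (PySem.List.enumerate lst 0).map (fun ie =>
    let c := PySem.List.count (PySem.List.slice lst none (some ie.1)) ie.2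
    if c = 0 then ie.2 else pvSuffix ie.2 (c : Int))

-- ===== PRECONDITION & SPEC =====
def Spec_make_elements_unique (lst : List String) (out : List String) : Prop := out = make_elements_unique_alt lst
instance (lst : List String) (out : List String) : Decidable (Spec_make_elements_unique lst out) := by unfold Spec_make_elements_unique; infer_instance

-- ===== CLAIM (what is proved, stated in full; the proofs are below) =====
def Claim_equal_make_elements_unique : Prop := ∀ (lst : List String), Dom_make_elements_unique lst → Spec_make_elements_unique lst (make_elements_unique lst)

-- ===== LEMMAS AND PROOFS =====

-- common characterisation: result of processing `rest` after prefix `p`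
def bspec : List String → List String → List String
  | _, [] => []
  | p, e :: rs =>
    (if p.count e = 0 then e else pvSuffix e (p.count e : Int)) :: bspec (p ++ [e]) rs

lemma altGen (rest : List String) : ∀ (p : List String),
    (PySem.List.enumerate rest (p.length : Int)).map
      (fun ie =>
        let c := PySem.List.count (PySem.List.slice (p ++ rest) none (some ie.1)) ie.2
        if c = 0 then ie.2 else pvSuffix ie.2 (c : Int))
    = bspec p rest := by
  induction rest with
  | nil => intro p; simp [PySem.List.enumerate_nil, bspec]
  | cons e rs ih =>
    intro p
    have h1 : PySem.List.slice (p ++ e :: rs) none (some (p.length : Int)) = p := by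
      rw [PySem.List.slice_to_natCast]
      simp
    have h2 : p ++ e :: rs = (p ++ [e]) ++ rs := by simp
    have htail := ih (p ++ [e])
    rw [PySem.List.enumerate_cons, List.map_cons]
    simp only [h1, PySem.List.count_eq, bspec]
    congr 1
    rw [h2]
    simpa using htail

lemma loopA (rest : List String) : ∀ (p : List String) (d : PySem.Dict String Int) (acc : List String),
    (∀ e, d.get? e = if p.count e = 0 then none else some ((p.count e : Int) - 1)) →
    (rest.foldl pvStepA (d, acc)).2 = acc ++ bspec p rest := by
  induction rest with
  | nil => intro p d acc _; simp [bspec]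
  | cons e rs ih =>
    intro p d acc hd
    have hcont : d.contains e = (p.count e ≠ 0 : Bool) := by
      rw [PySem.Dict.contains_eq_isSome_get?, hd e]
      by_cases hc : p.count e = 0 <;> simp [hc]
    rw [List.foldl_cons]
    by_cases hc : p.count e = 0
    · have : pvStepA (d, acc) e = (d.insert e 0, acc ++ [e]) := by
        simp [pvStepA, hcont, hc]
      rw [this, ih (p ++ [e])]
      · simp [bspec, hc]
      · intro e'
        by_cases he : e' = e
        · subst he
          simp [PySem.Dict.get?_insert_self, List.count_append, hc]
        · rw [PySem.Dict.get?_insert_of_ne _ _ he, hd e']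
          simp [List.count_append, Ne.symm he]
    · have hget : d.getD e 0 = (p.count e : Int) - 1 := by
        rw [PySem.Dict.getD_eq_get?_getD, hd e]
        simp [hc]
      have : pvStepA (d, acc) e = (d.insert e (p.count e : Int), acc ++ [pvSuffix e (p.count e : Int)]) := by
        simp [pvStepA, hcont, hc, hget]
      rw [this, ih (p ++ [e])]
      · simp [bspec, hc]
      · intro e'
        by_cases he : e' = e
        · subst he
          simp [PySem.Dict.get?_insert_self, List.count_append, hc]
        · rw [PySem.Dict.get?_insert_of_ne _ _ he, hd e']
          simp [List.count_append, Ne.symm he]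

-- ===== VERDICT (by name: the statement is the Claim_ definition above) =====
theorem make_elements_unique_spec : Claim_equal_make_elements_unique := by
  intro lst _
  unfold Spec_make_elements_unique make_elements_unique make_elements_unique_alt
  rw [loopA lst [] PySem.Dict.empty []
      (by intro e; simp [PySem.Dict.get?_empty])]
  have := altGen lst []
  simpa using this.symm
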